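-- pv_equiv track=rewrite | github.com/jjteunisse/aoc-2023 | laurens/day_5.py | get_conversion_lists
-- ===== SOURCE A (Python) =====
-- def get_conversion_lists(values: list):
--     conversion_lists = []
--     conversion_list = []
--
--     for i in range(2, len(values)):
--         if values[i].strip() == "":
--             conversion_lists.append(conversion_list.copy())
--             conversion_list = []
--             continue
--
--         if values[i][0].isdigit():
--             conversion_list.append(values[i].split(" "))
--
--     conversion_lists.append(conversion_list.copy())
--
--     return conversion_lists
-- ===== SOURCE B (Python) =====
-- def get_conversion_lists(values: list):
--     lines = values[2:]
--     breaks = [-1] + [i for i, l in enumerate(lines) if l.strip() == ""] + [len(lines)]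
--     return [
--         [l.split(" ") for l in lines[a + 1:b] if l[0].isdigit()]
--         for a, b in zip(breaks, breaks[1:])
--     ]
-- ===== Notes on version B (the rewrite author's own statement) =====
-- stated objective: alternative
-- what changed: B precomputes the blank-line separator indices once and builds each group by slicing between consecutive separators, instead of A's single accumulate-and-copy loop with mutable current-group state.
import Mathlib
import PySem

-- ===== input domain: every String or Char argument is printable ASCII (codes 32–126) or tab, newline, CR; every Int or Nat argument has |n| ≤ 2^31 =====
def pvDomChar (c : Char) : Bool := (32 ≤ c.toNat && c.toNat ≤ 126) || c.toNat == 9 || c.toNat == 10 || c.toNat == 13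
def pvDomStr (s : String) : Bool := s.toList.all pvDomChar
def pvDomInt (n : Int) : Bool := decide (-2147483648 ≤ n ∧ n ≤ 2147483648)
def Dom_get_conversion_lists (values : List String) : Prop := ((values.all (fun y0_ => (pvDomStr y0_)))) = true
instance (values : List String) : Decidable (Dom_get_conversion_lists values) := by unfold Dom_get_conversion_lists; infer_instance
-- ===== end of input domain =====

-- B precomputes the blank-line separator indices once and builds each group by slicing between
-- consecutive separators, instead of A's accumulate-and-copy loop (alternative decomposition, same cost).

-- shared atomic expressions of both Pythons: `l.strip() == ""`, `l[0].isdigit()`, `l.split(" ")`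
def pvBlank (l : String) : Bool := PySem.Str.strip l == ""
-- `l[0].isdigit()`; the `none` (IndexError) branch is unreachable in both programs: l is non-blank there
def pvDigit (l : String) : Bool := (PySem.Str.pyGet? l 0).elim false PySem.Chars.isdigit
-- `l.split(" ")`: split? with a non-empty separator is always `some`
def pvRow (l : String) : List String := (PySem.Str.split? l " ").getD []

-- ===== PORT A =====
def pvStepA (st : List (List (List String)) × List (List String)) (line : String) :
    List (List (List String)) × List (List String) :=
  if pvBlank line then (st.1 ++ [st.2], [])
  else if pvDigit line then (st.1, st.2 ++ [pvRow line])
  else st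

def get_conversion_lists (values : List String) : List (List (List String)) :=
  let st := (PySem.List.pyRange 2 (values.length : Int) 1).foldl
    (fun st i => pvStepA st (PySem.List.pyGetD values i "")) ([], [])
  st.1 ++ [st.2]

-- ===== PORT B =====
def get_conversion_lists_alt (values : List String) : List (List (List String)) :=
  let lines := PySem.List.slice values (some 2) none
  let breaks : List Int :=
    [(-1 : Int)]
      ++ ((PySem.List.enumerate lines 0).filter (fun p => pvBlank p.2)).map (·.1)
      ++ [(lines.length : Int)]
  (breaks.zip breaks.tail).map (fun ab =>
    ((PySem.List.slice lines (some (ab.1 + 1)) (some ab.2)).filter pvDigit).map pvRow)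

-- ===== PRECONDITION & SPEC =====
def Spec_get_conversion_lists (values : List String) (out : List (List (List String))) : Prop := out = get_conversion_lists_alt values
instance (values : List String) (out : List (List (List String))) : Decidable (Spec_get_conversion_lists values out) := by unfold Spec_get_conversion_lists; infer_instance

-- ===== CLAIM (what is proved, stated in full; the proofs are below) =====
def Claim_equal_get_conversion_lists : Prop := ∀ (values : List String), Dom_get_conversion_lists values → Spec_get_conversion_lists values (get_conversion_lists values)

-- ===== LEMMAS AND PROOFS =====

/-- one group: keep digit-leading lines, split each on a single space -/
def pvF (chunk : List String) : List (List String) := (chunk.filter pvDigit).map pvRow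

/-- canonical blank-separated chunks of the line list -/
def pvChunks : List String → List (List String)
  | [] => [[]]
  | l :: ls =>
    if pvBlank l then [] :: pvChunks ls
    else
      match pvChunks ls with
      | [] => [[l]]
      | c :: cs => (l :: c) :: cs

/-- blank positions, recursively -/
def pvBn : List String → List Int
  | [] => []
  | l :: ls => (if pvBlank l then [(0 : Int)] else []) ++ (pvBn ls).map (· + 1)

/-- the B-side chunk construction, abstracted over the line list -/
def pvChunksB (ls : List String) : List (List String) :=
  let bs : List Int := -1 :: (pvBn ls ++ [(ls.length : Int)])
  (bs.zip bs.tail).map (fun ab => PySem.List.slice ls (some (ab.1 + 1)) (some ab.2))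

lemma pvChunks_ne_nil (ls : List String) : pvChunks ls ≠ [] := by
  cases ls with
  | nil => simp [pvChunks]
  | cons l ls =>
    simp only [pvChunks]
    split
    · simp
    · split <;> simp

lemma pvBn_nonneg (ls : List String) : ∀ x ∈ pvBn ls, 0 ≤ x := by
  induction ls with
  | nil => simp [pvBn]
  | cons l ls ih =>
    intro x hx
    simp only [pvBn, List.mem_append, List.mem_map] at hx
    rcases hx with h | ⟨y, hy, rfl⟩
    · split at h <;> simp_all
    · have := ih y hy; omega

lemma pvBn_shift (ls : List String) (s : Int) :
    ((pvBn ls).map (· + 1)).map (· + s) = (pvBn ls).map (· + (s + 1)) := by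
  rw [List.map_map]
  exact List.map_congr_left (fun x _ => by simp only [Function.comp_apply]; omega)

lemma blanks_eq (ls : List String) : ∀ (s : Int),
    ((PySem.List.enumerate ls s).filter (fun p => pvBlank p.2)).map (·.1)
      = (pvBn ls).map (· + s) := by
  induction ls with
  | nil => intro s; simp [pvBn, PySem.List.enumerate_nil]
  | cons l ls ih =>
    intro s
    rw [PySem.List.enumerate_cons, List.filter_cons]
    by_cases hb : pvBlank l
    · simp only [hb, if_pos, List.map_cons, ih (s + 1), pvBn,
        List.singleton_append, pvBn_shift]
      simp
    · simp only [hb, Bool.false_eq_true, if_false, ih (s + 1), pvBn,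
        List.nil_append, pvBn_shift]

lemma slice_shift (l : String) (ls : List String) (a b : Int) (ha : -1 ≤ a) (hb : 0 ≤ b) :
    PySem.List.slice (l :: ls) (some (a + 1 + 1)) (some (b + 1))
      = PySem.List.slice ls (some (a + 1)) (some b) := by
  rw [PySem.List.slice_toNat (ha := by omega) (hb := by omega),
      PySem.List.slice_toNat (ha := by omega) (hb := hb)]
  have h1 : (a + 1 + 1).toNat = (a + 1).toNat + 1 := by omega
  rw [h1, List.drop_succ_cons]
  congr 1
  omega

lemma slice_cons_head (l : String) (ls : List String) (b : Int) (hb : 0 ≤ b) :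
    PySem.List.slice (l :: ls) (some (-1 + 1)) (some (b + 1))
      = l :: PySem.List.slice ls (some (-1 + 1)) (some b) := by
  rw [PySem.List.slice_toNat (ha := by omega) (hb := by omega),
      PySem.List.slice_toNat (ha := by omega) (hb := hb)]
  have h2 : (b + 1).toNat = b.toNat + 1 := by omega
  norm_num [h2, List.take_succ_cons]

lemma chunksB_eq (ls : List String) : pvChunksB ls = pvChunks ls := by
  induction ls with
  | nil =>
    simp only [pvChunksB, pvBn, pvChunks]
    decide
  | cons l ls ih =>
    have hlen : ((l :: ls).length : Int) = (ls.length : Int) + 1 := by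
      simp
    set t : List Int := pvBn ls ++ [(ls.length : Int)] with ht
    have htpos : ∀ x ∈ t, 0 ≤ x := by
      intro x hx
      rcases List.mem_append.mp hx with h | h
      · exact pvBn_nonneg ls x h
      · simp at h; omega
    have htne : t ≠ [] := by simp [ht]
    have hshift :
        ∀ (u : List Int), (∀ x ∈ u, -1 ≤ x) → (∀ x ∈ u.tail, 0 ≤ x) →
        ((u.map (· + 1)).zip ((u.map (· + 1)).tail)).map
            (fun ab => PySem.List.slice (l :: ls) (some (ab.1 + 1)) (some ab.2))
          = (u.zip u.tail).map
            (fun ab => PySem.List.slice ls (some (ab.1 + 1)) (some ab.2)) := by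
      intro u hu1 hu2
      rw [← List.map_tail, List.zip_map, List.map_map]
      refine List.map_congr_left ?_
      intro ab hab
      have h1 : ab.1 ∈ u := List.of_mem_zip hab |>.1
      have h2 : ab.2 ∈ u.tail := List.of_mem_zip hab |>.2
      simp only [Function.comp_apply]
      exact slice_shift l ls ab.1 ab.2 (hu1 _ h1) (hu2 _ h2)
    by_cases hb : pvBlank l
    · have hbn : pvBn (l :: ls) = 0 :: (pvBn ls).map (· + 1) := by
        simp [pvBn, hb]
      have hbs : (-1 : Int) :: (pvBn (l :: ls) ++ [((l :: ls).length : Int)])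
          = -1 :: ((-1 :: t).map (· + 1)) := by
        simp [hbn, ht]
      simp only [pvChunksB, hbs]
      have hmap1 : ((-1 : Int) :: t).map (· + 1) = 0 :: t.map (· + 1) := by simp
      rw [hmap1]
      simp only [List.zip_cons_cons, List.tail_cons, List.map_cons]
      rw [show (0 : Int) :: t.map (· + 1) = ((-1 :: t).map (· + 1)) from hmap1.symm]
      rw [show (t.map (· + 1)) = (((-1 : Int) :: t).map (· + 1)).tail by simp]
      rw [hshift (-1 :: t)
        (by intro x hx; rcases hx with _ | hx; omega;
            exact le_trans (by omega) (htpos _ (by assumption)))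
        (by simpa using htpos)]
      have hfirst : PySem.List.slice (l :: ls) (some (-1 + 1)) (some 0) = [] := by
        rw [PySem.List.slice_toNat (ha := by omega) (hb := by omega)]; simp
      rw [hfirst]
      simp only [pvChunks, hb, if_pos]
      rw [← ih]
      rfl
    · have hbn : pvBn (l :: ls) = (pvBn ls).map (· + 1) := by
        simp [pvBn, hb]
      have hbs : (-1 : Int) :: (pvBn (l :: ls) ++ [((l :: ls).length : Int)])
          = -1 :: (t.map (· + 1)) := by
        simp [hbn, ht]
      simp only [pvChunksB, hbs]
      obtain ⟨c0, r, hcr⟩ := List.exists_cons_of_ne_nil htne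
      have hc0 : 0 ≤ c0 := htpos c0 (by rw [hcr]; exact List.mem_cons_self ..)
      rw [hcr]
      simp only [List.map_cons, List.zip_cons_cons, List.tail_cons]
      rw [show ((c0 + 1) :: r.map (· + 1)) = (c0 :: r).map (· + 1) by simp]
      rw [show (r.map (· + 1)) = ((c0 :: r).map (· + 1)).tail by simp]
      rw [hshift (c0 :: r)
        (by intro x hx; have := htpos x (hcr ▸ hx); omega)
        (by intro x hx; exact htpos x (hcr ▸ List.mem_cons_of_mem _ hx))]
      rw [slice_cons_head l ls c0 hc0]
      have hih := ih
      rw [pvChunksB, ← ht, hcr] at hih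
      simp only [List.zip_cons_cons, List.tail_cons, List.map_cons] at hih
      simp only [pvChunks, hb, Bool.false_eq_true, if_false, List.tail_cons]
      rw [← hih]

lemma foldA (ls : List String) :
    ∀ (acc : List (List (List String))) (cur : List (List String)),
    (ls.foldl pvStepA (acc, cur)).1 ++ [(ls.foldl pvStepA (acc, cur)).2]
      = acc ++ (match (pvChunks ls).map pvF with
                | [] => [cur]
                | x :: xs => (cur ++ x) :: xs) := by
  induction ls with
  | nil => intro acc cur; simp [pvChunks, pvF]
  | cons l ls ih =>
    intro acc cur
    obtain ⟨c, cs, hc⟩ := List.exists_cons_of_ne_nil (pvChunks_ne_nil ls)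
    rw [List.foldl_cons]
    by_cases hbl : pvBlank l
    · have hstep : pvStepA (acc, cur) l = (acc ++ [cur], []) := by
        simp [pvStepA, hbl]
      rw [hstep, ih]
      simp only [pvChunks, hbl, if_pos, List.map_cons, hc]
      simp [pvF]
    · by_cases hd : pvDigit l
      · have hstep : pvStepA (acc, cur) l = (acc, cur ++ [pvRow l]) := by
          simp [pvStepA, hbl, hd]
        rw [hstep, ih]
        simp only [pvChunks, hbl, Bool.false_eq_true, if_false, hc, List.map_cons]
        have hF : pvF (l :: c) = pvRow l :: pvF c := by
          simp [pvF, hd]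
        rw [hF]
        simp
      · have hstep : pvStepA (acc, cur) l = (acc, cur) := by
          simp [pvStepA, hbl, hd]
        rw [hstep, ih]
        simp only [pvChunks, hbl, Bool.false_eq_true, if_false, hc, List.map_cons]
        have hF : pvF (l :: c) = pvF c := by
          simp [pvF, hd]
        rw [hF]

lemma pvBval (ls : List String) :
    ((([(-1 : Int)]
        ++ ((PySem.List.enumerate ls 0).filter (fun p => pvBlank p.2)).map (·.1)
        ++ [(ls.length : Int)]).zip
      ([(-1 : Int)]
        ++ ((PySem.List.enumerate ls 0).filter (fun p => pvBlank p.2)).map (·.1)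
        ++ [(ls.length : Int)]).tail).map
      (fun ab => ((PySem.List.slice ls (some (ab.1 + 1)) (some ab.2)).filter pvDigit).map pvRow))
    = (pvChunks ls).map pvF := by
  have hbl : ((PySem.List.enumerate ls 0).filter (fun p => pvBlank p.2)).map (·.1)
      = pvBn ls := by
    rw [blanks_eq ls 0]
    simp
  rw [hbl]
  have h1 : ([(-1 : Int)] ++ pvBn ls ++ [(ls.length : Int)])
      = -1 :: (pvBn ls ++ [(ls.length : Int)]) := by simp
  rw [h1, ← chunksB_eq, pvChunksB]
  simp [pvF, Function.comp]

-- ===== VERDICT (by name: the statement is the Claim_ definition above) =====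
theorem get_conversion_lists_spec : Claim_equal_get_conversion_lists := by
  intro values _
  show Spec_get_conversion_lists values (get_conversion_lists values)
  unfold Spec_get_conversion_lists
  simp only [get_conversion_lists, get_conversion_lists_alt]
  have hA : (PySem.List.pyRange 2 (values.length : Int) 1).foldl
      (fun st i => pvStepA st (PySem.List.pyGetD values i "")) ([], [])
      = (values.drop 2).foldl pvStepA ([], []) := by
    have h := PySem.List.foldl_pyRange_pyGetD' values "" pvStepA ([], []) (a := 2) (by omega)
    simpa using h
  have hdrop : PySem.List.slice values (some 2) none = values.drop 2 := by
    have h := PySem.List.slice_from values (a := 2) (by omega)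
    simpa using h
  rw [hA, hdrop]
  obtain ⟨c, cs, hc⟩ := List.exists_cons_of_ne_nil (pvChunks_ne_nil (values.drop 2))
  have hAval : ((values.drop 2).foldl pvStepA ([], [])).1
        ++ [((values.drop 2).foldl pvStepA ([], [])).2]
      = (pvChunks (values.drop 2)).map pvF := by
    rw [foldA (values.drop 2) [] []]
    simp [hc]
  rw [hAval, ← pvBval (values.drop 2)]
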